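-- pv_equiv track=rewrite | github.com/james5635/GeekForGeek-Data-Structure-and-Algorithm | hashing/medium/employees_under_every_employee/solution.py | count_employees_under_manager
-- ===== SOURCE A (Python) =====
-- def count_employees_under_manager(arr):
--     """
--     Count employees under every manager.
--
--     Args:
--         arr: 2D list where each element is [employee, manager]
--
--     Returns:
--         Dictionary with employee -> count of employees under them
--     """
--     if not arr:
--         return {}
--
--     # Build adjacency list: manager -> list of direct reports
--     manager_map = {}
--     all_employees = set()
--
--     for employee, manager in arr:
--         all_employees.add(employee)
--         all_employees.add(manager)
--
--         if manager not in manager_map: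
--             manager_map[manager] = []
--         if employee != manager:  # CEO reports to himself
--             manager_map[manager].append(employee)
--
--     # Memoization cache
--     memo = {}
--
--     def count_subordinates(emp):
--         """Count all employees under given employee using DFS."""
--         if emp in memo:
--             return memo[emp]
--
--         count = 0
--         if emp in manager_map:
--             for subordinate in manager_map[emp]:
--                 count += 1 + count_subordinates(subordinate)
--
--         memo[emp] = count
--         return count
--
--     # Calculate for all employees
--     result = {}
--     for employee in sorted(all_employees):
--         result[employee] = count_subordinates(employee)
--
--     return result
-- ===== SOURCE B (Python) =====
-- def count_employees_under_manager(arr):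
--     """
--     Count employees under every manager.
--
--     Args:
--         arr: 2D list where each element is [employee, manager]
--
--     Returns:
--         Dictionary with employee -> count of employees under them
--     """
--     children = {}
--     nodes = set()
--     for row in arr:
--         employee, manager = row
--         nodes.add(employee)
--         nodes.add(manager)
--         children.setdefault(manager, [])
--         if employee != manager:  # CEO reports to himself
--             children[manager].append(employee)
--
--     # Iterative fixpoint DP: after len(nodes) rounds every count is exact
--     # (counts[e] after k rounds = number of downward paths of length <= k from e).
--     counts = {e: 0 for e in nodes}
--     for _ in range(len(nodes)):
--         counts = {e: sum(1 + counts[c] for c in children.get(e, []))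
--                   for e in nodes}
--
--     return {e: counts[e] for e in sorted(nodes)}
-- ===== Notes on version B (the rewrite author's own statement) =====
-- stated objective: alternative
-- what changed: Replaces A's memoized top-down DFS recursion with an iterative bottom-up dynamic program: counts start at 0 and the map e -> sum(1+counts[c] for direct reports c) is applied len(nodes) times, which reaches the exact fixpoint on any acyclic hierarchy, so no recursion and no memo table are needed.
import Mathlib
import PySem

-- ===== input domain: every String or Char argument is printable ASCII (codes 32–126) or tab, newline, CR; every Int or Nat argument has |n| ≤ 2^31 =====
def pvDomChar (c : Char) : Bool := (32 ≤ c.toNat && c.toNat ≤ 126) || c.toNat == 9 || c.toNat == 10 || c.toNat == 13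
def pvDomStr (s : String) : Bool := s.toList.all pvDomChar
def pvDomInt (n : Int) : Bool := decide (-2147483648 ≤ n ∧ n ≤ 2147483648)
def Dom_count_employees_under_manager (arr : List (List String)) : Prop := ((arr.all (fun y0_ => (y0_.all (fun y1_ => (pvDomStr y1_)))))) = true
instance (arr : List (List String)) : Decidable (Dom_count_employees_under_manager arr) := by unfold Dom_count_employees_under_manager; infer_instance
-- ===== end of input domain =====

-- B replaces A's memoized top-down DFS with an iterative bottom-up fixpoint DP (len(nodes) rounds
-- of counts[e] = sum(1+counts[c])); equal results on every acyclic length-2-row input (Pre_).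


-- ===== PORT A =====
-- manager_map / all_employees build loop of A
def pvA_build (arr : List (List String)) :
    PySem.Dict String (List String) × PySem.Set String :=
  arr.foldl (fun st row =>
    match row with
    | [employee, manager] =>
      let all := PySem.Set.add (PySem.Set.add st.2 employee) manager
      let mm := if PySem.Dict.contains st.1 manager then st.1
                else PySem.Dict.insert st.1 manager []
      let mm := if employee ≠ manager
                then PySem.Dict.modify mm manager [] (fun l => l ++ [employee])
                else mm
      (mm, all)
    | _ => st)   -- rows that do not unpack to [employee, manager] raise in Python: outside Pre_
    (PySem.Dict.empty, PySem.Set.empty)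

mutual
-- count_subordinates(emp) with the memo dict threaded through; fuel = recursion depth,
-- none = fuel exhausted (only reachable on cyclic input, which Pre_ excludes)
def pvA_dfs (mm : PySem.Dict String (List String)) :
    Nat → PySem.Dict String Int → String → Option (Int × PySem.Dict String Int)
  | 0, _, _ => none
  | Nat.succ fuel, memo, emp =>
    match PySem.Dict.get? memo emp with
    | some v => some (v, memo)
    | none =>
      match pvA_dfsGo mm fuel memo (PySem.Dict.getD mm emp []) 0 with
      | none => none
      | some (count, memo') => some (count, PySem.Dict.insert memo' emp count)

-- the 'for subordinate in manager_map[emp]' loop: count += 1 + count_subordinates(subordinate)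
def pvA_dfsGo (mm : PySem.Dict String (List String)) :
    Nat → PySem.Dict String Int → List String → Int → Option (Int × PySem.Dict String Int)
  | _, memo, [], count => some (count, memo)
  | fuel, memo, s :: rest, count =>
    match pvA_dfs mm fuel memo s with
    | none => none
    | some (v, memo') => pvA_dfsGo mm fuel memo' rest (count + 1 + v)
end

def count_employees_under_manager (arr : List (List String)) : List (String × Int) :=
  if arr = [] then []
  else
    let bm := pvA_build arr
    let fuel := bm.2.length + 1
    let res := (PySem.List.sorted bm.2 (fun x => x) false).foldl
      (fun (st : PySem.Dict String Int × PySem.Dict String Int) employee =>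
        match pvA_dfs bm.1 fuel st.2 employee with
        | some (v, memo') => (PySem.Dict.insert st.1 employee v, memo')
        | none => (PySem.Dict.insert st.1 employee 0, st.2))  -- unreachable under Pre_
      (PySem.Dict.empty, PySem.Dict.empty)
    res.1.items

-- ===== PORT B =====
-- children / nodes build loop of B (setdefault + conditional append)
def pvB_build (arr : List (List String)) :
    PySem.Dict String (List String) × PySem.Set String :=
  arr.foldl (fun st row =>
    match row with
    | [employee, manager] =>
      let nodes := PySem.Set.add (PySem.Set.add st.2 employee) manager
      let ch := PySem.Dict.setdefault st.1 manager []
      let ch := if employee ≠ manager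
                then PySem.Dict.modify ch manager [] (fun l => l ++ [employee])
                else ch
      (ch, nodes)
    | _ => st)   -- rows that do not unpack raise in Python: outside Pre_
    (PySem.Dict.empty, PySem.Set.empty)

-- counts after k rounds of 'counts = {e: sum(1 + counts[c] for c in children.get(e, [])) for e in nodes}'
def pvB_counts (ch : PySem.Dict String (List String)) (nodes : List String) :
    Nat → PySem.Dict String Int
  | 0 => nodes.foldl (fun d e => PySem.Dict.insert d e 0) PySem.Dict.empty
  | Nat.succ k =>
    nodes.foldl (fun d e => PySem.Dict.insert d e
        ((PySem.Dict.getD ch e []).foldl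
          (fun s c => s + (1 + PySem.Dict.getD (pvB_counts ch nodes k) c 0)) 0))
      PySem.Dict.empty

def count_employees_under_manager_alt (arr : List (List String)) : List (String × Int) :=
  let bm := pvB_build arr
  let counts := pvB_counts bm.1 bm.2 bm.2.length
  -- {e: counts[e] for e in sorted(nodes)} over distinct sorted keys, as the association list
  (PySem.List.sorted bm.2 (fun x => x) false).map
    (fun e => (e, PySem.Dict.getD counts e 0))

-- ===== PRECONDITION & SPEC =====
-- closed-form view of the edge data, used only by Pre_ and the proofs
def pvRowNodes : List String → List String
  | [e, m] => [e, m]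
  | _ => []

def pvFlat : List (List String) → List String
  | [] => []
  | row :: rest => pvRowNodes row ++ pvFlat rest

def pvNodes (arr : List (List String)) : List String := PySem.Set.ofList (pvFlat arr)

def pvRowKid (m : String) : List String → List String
  | [e, mg] => if mg = m ∧ e ≠ mg then [e] else []
  | _ => []

def pvKids (arr : List (List String)) (m : String) : List String :=
  match arr with
  | [] => []
  | row :: rest => pvRowKid m row ++ pvKids rest m

def pvStep (arr : List (List String)) (S : Finset String) : Finset String :=
  S ∪ S.biUnion (fun e => (pvKids arr e).toFinset)

-- everything reachable from c by repeatedly following direct-report edges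
def pvReach (arr : List (List String)) (c : String) : Finset String :=
  (pvStep arr)^[(pvNodes arr).length + 1] {c}

-- Pre_ excludes rows that are not [employee, manager] pairs (Python's unpacking raises ValueError)
-- and cyclic report chains (A's recursion raises RecursionError).
def Pre_count_employees_under_manager (arr : List (List String)) : Prop :=
  (∀ row ∈ arr, row.length = 2) ∧
  ∀ e ∈ pvNodes arr, ∀ c ∈ pvKids arr e, e ∉ pvReach arr c

instance (arr : List (List String)) : Decidable (Pre_count_employees_under_manager arr) := by
  unfold Pre_count_employees_under_manager; infer_instance

def pvWitness_count_employees_under_manager : List (List String) :=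
  [["B", "A"], ["C", "A"], ["D", "B"]]

def Spec_count_employees_under_manager (arr : List (List String)) (out : List (String × Int)) : Prop := out = count_employees_under_manager_alt arr
instance (arr : List (List String)) (out : List (String × Int)) : Decidable (Spec_count_employees_under_manager arr out) := by unfold Spec_count_employees_under_manager; infer_instance

-- ===== CLAIM (what is proved, stated in full; the proofs are below) =====
def Claim_equal_count_employees_under_manager : Prop := ∀ (arr : List (List String)), Dom_count_employees_under_manager arr → Pre_count_employees_under_manager arr → Spec_count_employees_under_manager arr (count_employees_under_manager arr)

-- ===== LEMMAS AND PROOFS =====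

-- number of downward report paths of length ≤ k starting at e (the DP quantity)
def pvCnt (arr : List (List String)) : Nat → String → Int
  | 0, _ => 0
  | Nat.succ k, e => (pvKids arr e).foldl (fun s c => s + (1 + pvCnt arr k c)) 0

def pvH (arr : List (List String)) (e : String) : Nat := (pvReach arr e).card

def pvTc (arr : List (List String)) (e : String) : Int := pvCnt arr (pvH arr e) e

theorem pv_builds_eq (arr : List (List String)) : pvB_build arr = pvA_build arr := by
  unfold pvB_build pvA_build
  congr 1
  funext st row
  match row with
  | [] => rfl
  | [a] => rfl
  | a :: b :: c :: r => rfl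
  | [employee, manager] =>
    simp only []
    rw [PySem.Dict.setdefault]
    by_cases h : st.1.contains manager = true
    · simp [h]
    · have hins : st.1.insert manager ([] : List String) = ⟨st.1.items ++ [(manager, [])]⟩ := by
        apply PySem.Dict.ext
        rw [PySem.Dict.items_insert_of_not_contains _ _ (by simpa using h)]
      simp [h, hins]
def pvStepA (st : PySem.Dict String (List String) × PySem.Set String) (row : List String) :
    PySem.Dict String (List String) × PySem.Set String :=
  match row with
  | [employee, manager] =>
    let all := PySem.Set.add (PySem.Set.add st.2 employee) manager
    let mm := if PySem.Dict.contains st.1 manager then st.1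
              else PySem.Dict.insert st.1 manager []
    let mm := if employee ≠ manager
              then PySem.Dict.modify mm manager [] (fun l => l ++ [employee])
              else mm
    (mm, all)
  | _ => st

theorem pvA_build_eq (arr : List (List String)) :
    pvA_build arr = arr.foldl pvStepA (PySem.Dict.empty, PySem.Set.empty) := rfl

theorem pv_getD_if_insert (d : PySem.Dict String (List String)) (mg m : String) :
    (if d.contains mg = true then d else d.insert mg []).getD m [] = d.getD m [] := by
  by_cases h : d.contains mg = true
  · simp [h]
  · rw [if_neg h, PySem.Dict.getD_insert]
    split_ifs with he
    · subst he; rw [PySem.Dict.getD_of_not_contains _ _ (by simpa using h)]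
    · rfl

theorem pv_build_inv (rest : List (List String)) :
    ∀ (d : PySem.Dict String (List String)) (s : PySem.Set String),
    (∀ m, (rest.foldl pvStepA (d, s)).1.getD m [] = d.getD m [] ++ pvKids rest m) ∧
    (rest.foldl pvStepA (d, s)).2 = PySem.Set.update s (pvFlat rest) := by
  induction rest with
  | nil => intro d s; simp [pvKids, pvFlat, PySem.Set.update_nil]
  | cons row rest ih =>
    intro d s
    match row with
    | [] => simpa [List.foldl_cons, pvStepA, pvKids, pvFlat, pvRowKid, pvRowNodes] using ih d s
    | [a] => simpa [List.foldl_cons, pvStepA, pvKids, pvFlat, pvRowKid, pvRowNodes] using ih d s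
    | a :: b :: c :: r => simpa [List.foldl_cons, pvStepA, pvKids, pvFlat, pvRowKid, pvRowNodes] using ih d s
    | [e, mg] =>
      have hstep : pvStepA (d, s) [e, mg] =
          (if e ≠ mg
           then PySem.Dict.modify (if d.contains mg = true then d else d.insert mg []) mg []
             (fun l => l ++ [e])
           else (if d.contains mg = true then d else d.insert mg []),
           PySem.Set.add (PySem.Set.add s e) mg) := rfl
      rw [List.foldl_cons, hstep]
      obtain ⟨ih1, ih2⟩ := ih (if e ≠ mg
           then PySem.Dict.modify (if d.contains mg = true then d else d.insert mg []) mg []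
             (fun l => l ++ [e])
           else (if d.contains mg = true then d else d.insert mg []))
        (PySem.Set.add (PySem.Set.add s e) mg)
      constructor
      · intro m
        rw [ih1 m]
        have : (if e ≠ mg
           then PySem.Dict.modify (if d.contains mg = true then d else d.insert mg []) mg []
             (fun l => l ++ [e])
           else (if d.contains mg = true then d else d.insert mg [])).getD m [] =
            d.getD m [] ++ (if mg = m ∧ e ≠ mg then [e] else []) := by
          by_cases hne : e ≠ mg
          · rw [if_pos hne, PySem.Dict.getD_modify]
            by_cases h1 : m = mg
            · subst h1; simp [pv_getD_if_insert, hne]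
            · have h2 : ¬(mg = m ∧ e ≠ mg) := fun h => h1 h.1.symm
              rw [if_neg h1, if_neg h2, pv_getD_if_insert, List.append_nil]
          · rw [if_neg hne, pv_getD_if_insert]
            simp [hne]
        rw [this, pvKids, pvRowKid, List.append_assoc]
      · rw [ih2]
        show PySem.Set.update (PySem.Set.update s [e, mg]) (pvFlat rest) = _
        rw [pvFlat, pvRowNodes, ← PySem.Set.update_append]
theorem pv_build_kids (arr : List (List String)) (m : String) :
    PySem.Dict.getD (pvA_build arr).1 m [] = pvKids arr m := by
  rw [pvA_build_eq]
  simpa [PySem.Dict.getD_empty] using (pv_build_inv arr PySem.Dict.empty PySem.Set.empty).1 m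

theorem pv_build_nodes (arr : List (List String)) : (pvA_build arr).2 = pvNodes arr := by
  rw [pvA_build_eq]
  simpa [PySem.Set.update_nil_left, pvNodes] using (pv_build_inv arr PySem.Dict.empty PySem.Set.empty).2

-- membership facts about pvKids / pvNodes
theorem pv_mem_flat_of_kid (arr : List (List String)) (m c : String) (h : c ∈ pvKids arr m) :
    c ∈ pvFlat arr ∧ m ∈ pvFlat arr := by
  induction arr with
  | nil => simp [pvKids] at h
  | cons row rest ih =>
    rw [pvKids] at h
    rw [pvFlat]
    rcases List.mem_append.1 h with h1 | h2
    · match row with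
      | [] => simp [pvRowKid] at h1
      | [a] => simp [pvRowKid] at h1
      | a :: b :: x :: r => simp [pvRowKid] at h1
      | [e, mg] =>
        rw [pvRowKid] at h1
        split_ifs at h1 with hc
        · simp at h1
          subst h1
          exact ⟨by simp [pvRowNodes], by simp [pvRowNodes, hc.1]⟩
        · simp at h1
    · obtain ⟨h1, h2⟩ := ih h2
      exact ⟨List.mem_append.2 (Or.inr h1), List.mem_append.2 (Or.inr h2)⟩

theorem pv_kid_mem_nodes (arr : List (List String)) (m c : String) (h : c ∈ pvKids arr m) :
    c ∈ pvNodes arr := by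
  rw [pvNodes, PySem.Set.mem_ofList]; exact (pv_mem_flat_of_kid arr m c h).1

theorem pv_parent_mem_nodes (arr : List (List String)) (m c : String) (h : c ∈ pvKids arr m) :
    m ∈ pvNodes arr := by
  rw [pvNodes, PySem.Set.mem_ofList]; exact (pv_mem_flat_of_kid arr m c h).2
theorem pv_nodes_nodup (arr : List (List String)) : (pvNodes arr).Nodup := by
  rw [pvNodes]; exact PySem.Set.nodup_ofList _

theorem pvStep_subset (arr : List (List String)) (S : Finset String) : S ⊆ pvStep arr S :=
  Finset.subset_union_left

theorem pv_iter_subset (arr : List (List String)) (S : Finset String) (k : Nat) :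
    S ⊆ (pvStep arr)^[k] S := by
  induction k with
  | zero => simp
  | succ k ih =>
    rw [Function.iterate_succ_apply']
    exact ih.trans (pvStep_subset arr _)

theorem pv_iter_succ_subset (arr : List (List String)) (S : Finset String) (k : Nat) :
    (pvStep arr)^[k] S ⊆ (pvStep arr)^[k + 1] S := by
  rw [Function.iterate_succ_apply']
  exact pvStep_subset arr _

theorem pv_mem_reach_self (arr : List (List String)) (c : String) : c ∈ pvReach arr c :=
  pv_iter_subset arr {c} _ (Finset.mem_singleton_self c)

theorem pv_iter_bound (arr : List (List String)) (e : String) (he : e ∈ pvNodes arr) (k : Nat) :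
    (pvStep arr)^[k] {e} ⊆ (pvNodes arr).toFinset := by
  induction k with
  | zero => simpa using he
  | succ k ih =>
    rw [Function.iterate_succ_apply']
    apply Finset.union_subset ih
    intro x hx
    rw [Finset.mem_biUnion] at hx
    obtain ⟨y, _, hxy⟩ := hx
    rw [List.mem_toFinset] at hxy ⊢
    exact pv_kid_mem_nodes arr y x hxy

theorem pv_iter_grow (arr : List (List String)) (e : String) (k : Nat)
    (h : ∀ k' < k, (pvStep arr)^[k'] {e} ≠ (pvStep arr)^[k' + 1] {e}) :
    k + 1 ≤ ((pvStep arr)^[k] {e}).card := by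
  induction k with
  | zero => simp
  | succ k ih =>
    have h1 : k + 1 ≤ ((pvStep arr)^[k] {e}).card :=
      ih (fun k' hk' => h k' (Nat.lt_succ_of_lt hk'))
    have h2 : ((pvStep arr)^[k] {e}).card < ((pvStep arr)^[k + 1] {e}).card :=
      Finset.card_lt_card (lt_of_le_of_ne (pv_iter_succ_subset arr _ k) (h k (Nat.lt_succ_self k)))
    omega

theorem pv_iter_stab (arr : List (List String)) (e : String) (k j : Nat)
    (h : (pvStep arr)^[k] {e} = (pvStep arr)^[k + 1] {e}) (hkj : k ≤ j) :
    (pvStep arr)^[j] {e} = (pvStep arr)^[k] {e} := by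
  induction j with
  | zero => simp [Nat.le_zero.1 hkj]
  | succ j ih =>
    rcases Nat.lt_or_ge k (j + 1) with hlt | hge
    · have hkj' : k ≤ j := Nat.lt_succ_iff.1 hlt
      rw [Function.iterate_succ_apply', ih hkj', ← Function.iterate_succ_apply' (pvStep arr) k {e}]
      exact h.symm
    · have : k = j + 1 := le_antisymm hkj hge
      rw [this]

theorem pv_reach_fix (arr : List (List String)) (e : String) (he : e ∈ pvNodes arr) :
    pvStep arr (pvReach arr e) = pvReach arr e := by
  set N := (pvNodes arr).length with hN
  have hcardN : (pvNodes arr).toFinset.card = N := by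
    rw [List.toFinset_card_of_nodup (pv_nodes_nodup arr)]
  have hex : ∃ k < N + 1, (pvStep arr)^[k] {e} = (pvStep arr)^[k + 1] {e} := by
    by_contra hno
    push Not at hno
    have := pv_iter_grow arr e (N + 1) hno
    have hb := Finset.card_le_card (pv_iter_bound arr e he (N + 1))
    omega
  obtain ⟨k, hk, hfix⟩ := hex
  have h1 : (pvStep arr)^[N + 1] {e} = (pvStep arr)^[k] {e} :=
    pv_iter_stab arr e k (N + 1) hfix (by omega)
  have h2 : (pvStep arr)^[N + 2] {e} = (pvStep arr)^[k] {e} :=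
    pv_iter_stab arr e k (N + 2) hfix (by omega)
  have hre : pvReach arr e = (pvStep arr)^[N + 1] {e} := rfl
  rw [hre, ← Function.iterate_succ_apply' (pvStep arr) (N + 1) {e}]
  show (pvStep arr)^[N + 2] {e} = (pvStep arr)^[N + 1] {e}
  rw [h1, h2]

theorem pv_reach_closed (arr : List (List String)) (e : String) (he : e ∈ pvNodes arr)
    {x y : String} (hx : x ∈ pvReach arr e) (hy : y ∈ pvKids arr x) : y ∈ pvReach arr e := by
  rw [← pv_reach_fix arr e he]
  apply Finset.mem_union_right
  rw [Finset.mem_biUnion]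
  exact ⟨x, hx, List.mem_toFinset.2 hy⟩

theorem pv_reach_min (arr : List (List String)) (e : String) (T : Finset String)
    (heT : e ∈ T) (hcl : ∀ x ∈ T, ∀ y ∈ pvKids arr x, y ∈ T) : pvReach arr e ⊆ T := by
  have : ∀ k, (pvStep arr)^[k] {e} ⊆ T := by
    intro k
    induction k with
    | zero => simpa using heT
    | succ k ih =>
      rw [Function.iterate_succ_apply']
      apply Finset.union_subset ih
      intro x hx
      rw [Finset.mem_biUnion] at hx
      obtain ⟨y, hy, hxy⟩ := hx
      exact hcl y (ih hy) x (List.mem_toFinset.1 hxy)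
  exact this _

theorem pvH_pos (arr : List (List String)) (e : String) : 1 ≤ pvH arr e :=
  Finset.card_pos.2 ⟨e, pv_mem_reach_self arr e⟩

theorem pvH_le (arr : List (List String)) (e : String) (he : e ∈ pvNodes arr) :
    pvH arr e ≤ (pvNodes arr).length := by
  have := Finset.card_le_card (pv_iter_bound arr e he ((pvNodes arr).length + 1))
  rw [List.toFinset_card_of_nodup (pv_nodes_nodup arr)] at this
  exact this

theorem pvH_lt (arr : List (List String)) (hpre : Pre_count_employees_under_manager arr)
    {e c : String} (hc : c ∈ pvKids arr e) : pvH arr c < pvH arr e := by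
  have he : e ∈ pvNodes arr := pv_parent_mem_nodes arr e c hc
  have hcn : c ∈ pvNodes arr := pv_kid_mem_nodes arr e c hc
  have hsub : pvReach arr c ⊆ pvReach arr e := by
    apply pv_reach_min
    · exact pv_reach_closed arr e he (pv_mem_reach_self arr e) hc
    · intro x hx y hy
      exact pv_reach_closed arr e he hx hy
  have hnot : e ∉ pvReach arr c := hpre.2 e he c hc
  exact Finset.card_lt_card (Finset.ssubset_iff_of_subset hsub |>.2
    ⟨e, pv_mem_reach_self arr e, hnot⟩)
theorem pv_cnt_congr (arr : List (List String)) (hpre : Pre_count_employees_under_manager arr) :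
    ∀ (n : Nat) (e : String) (k1 k2 : Nat),
    pvH arr e ≤ n → pvH arr e ≤ k1 → pvH arr e ≤ k2 → pvCnt arr k1 e = pvCnt arr k2 e := by
  intro n
  induction n using Nat.strong_induction_on with
  | _ n ih =>
    intro e k1 k2 hn h1 h2
    have hpos := pvH_pos arr e
    match k1, k2 with
    | 0, _ => omega
    | Nat.succ a, 0 => omega
    | Nat.succ a, Nat.succ b =>
      rw [pvCnt, pvCnt]
      apply PySem.List.foldl_congr_mem
      intro acc c hc
      have hlt := pvH_lt arr hpre hc
      rw [ih (pvH arr c) (by omega) c a b le_rfl (by omega) (by omega)]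

theorem pv_cnt_stable (arr : List (List String)) (hpre : Pre_count_employees_under_manager arr)
    (e : String) (k : Nat) (h : pvH arr e ≤ k) : pvCnt arr k e = pvTc arr e :=
  pv_cnt_congr arr hpre (pvH arr e) e k (pvH arr e) le_rfl h le_rfl

theorem pv_tc_fix (arr : List (List String)) (hpre : Pre_count_employees_under_manager arr)
    (e : String) :
    pvTc arr e = (pvKids arr e).foldl (fun s c => s + (1 + pvTc arr c)) 0 := by
  rw [pvTc]
  have hpos := pvH_pos arr e
  obtain ⟨m, hm⟩ : ∃ m, pvH arr e = m + 1 := ⟨pvH arr e - 1, by omega⟩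
  rw [hm, pvCnt]
  apply PySem.List.foldl_congr_mem
  intro acc c hc
  rw [pv_cnt_stable arr hpre c m (by have := pvH_lt arr hpre hc; omega)]
def pvInv (arr : List (List String)) (memo : PySem.Dict String Int) : Prop :=
  ∀ k v, memo.get? k = some v → v = pvTc arr k

theorem pv_dfs_ok (arr : List (List String)) (hpre : Pre_count_employees_under_manager arr)
    (mm : PySem.Dict String (List String))
    (hmm : ∀ m, PySem.Dict.getD mm m [] = pvKids arr m) :
    ∀ (n : Nat) (e : String), pvH arr e ≤ n → ∀ (fuel : Nat) (memo : PySem.Dict String Int),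
    pvInv arr memo → pvH arr e ≤ fuel →
    ∃ memo', pvA_dfs mm fuel memo e = some (pvTc arr e, memo') ∧ pvInv arr memo' := by
  intro n
  induction n using Nat.strong_induction_on with
  | _ n ih =>
    intro e hn fuel memo hinv hfuel
    have hpos := pvH_pos arr e
    match fuel with
    | 0 => omega
    | Nat.succ f =>
      rw [pvA_dfs]
      cases hmem : memo.get? e with
      | some v =>
        exact ⟨memo, by simp [hinv e v hmem], hinv⟩
      | none =>
        have go : ∀ (l : List String), (∀ c ∈ l, pvH arr c < n ∧ pvH arr c ≤ f) →
            ∀ (memo : PySem.Dict String Int) (acc : Int), pvInv arr memo →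
            ∃ memo', pvA_dfsGo mm f memo l acc =
              some (l.foldl (fun s c => s + (1 + pvTc arr c)) acc, memo') ∧ pvInv arr memo' := by
          intro l
          induction l with
          | nil => intro _ memo acc hinv; exact ⟨memo, by simp [pvA_dfsGo], hinv⟩
          | cons c rest ihl =>
            intro hl memo acc hinv
            obtain ⟨hc1, hc2⟩ := hl c (List.mem_cons_self)
            obtain ⟨memo1, heq1, hinv1⟩ :=
              ih (pvH arr c) (by omega) c le_rfl f memo hinv hc2
            obtain ⟨memo2, heq2, hinv2⟩ :=
              ihl (fun x hx => hl x (List.mem_cons_of_mem c hx)) memo1 (acc + 1 + pvTc arr c) hinv1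
            refine ⟨memo2, ?_, hinv2⟩
            rw [pvA_dfsGo, heq1]
            simp only [List.foldl_cons]
            rw [← add_assoc]
            exact heq2
        obtain ⟨memo', heq, hinv'⟩ := go (PySem.Dict.getD mm e [])
          (by intro c hc
              rw [hmm e] at hc
              have := pvH_lt arr hpre hc
              exact ⟨by omega, by omega⟩)
          memo 0 hinv
        refine ⟨PySem.Dict.insert memo' e (pvTc arr e), ?_, ?_⟩
        · rw [heq]
          have hval : (PySem.Dict.getD mm e []).foldl (fun s c => s + (1 + pvTc arr c)) 0 =
              pvTc arr e := by rw [hmm e, ← pv_tc_fix arr hpre e]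
          simp [hval]
        · intro k v hkv
          rw [PySem.Dict.get?_insert] at hkv
          split_ifs at hkv with hke
          · subst hke; cases hkv; rfl
          · exact hinv' k v hkv
theorem pv_loop_ok (arr : List (List String)) (hpre : Pre_count_employees_under_manager arr)
    (mm : PySem.Dict String (List String))
    (hmm : ∀ m, PySem.Dict.getD mm m [] = pvKids arr m) (fuel : Nat)
    (hfl : ∀ e ∈ pvNodes arr, pvH arr e ≤ fuel) :
    ∀ (l : List String), l.Nodup → (∀ e ∈ l, e ∈ pvNodes arr) →
    ∀ (res memo : PySem.Dict String Int), pvInv arr memo →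
    (∀ e ∈ l, res.contains e = false) →
    (l.foldl
      (fun (st : PySem.Dict String Int × PySem.Dict String Int) employee =>
        match pvA_dfs mm fuel st.2 employee with
        | some (v, memo') => (PySem.Dict.insert st.1 employee v, memo')
        | none => (PySem.Dict.insert st.1 employee 0, st.2))
      (res, memo)).1.items = res.items ++ l.map (fun e => (e, pvTc arr e)) := by
  intro l
  induction l with
  | nil => intro _ _ res memo _ _; simp
  | cons e rest ihl =>
    intro hnd hmem res memo hinv hcon
    obtain ⟨memo', heq, hinv'⟩ :=
      pv_dfs_ok arr hpre mm hmm (pvH arr e) e le_rfl fuel memo hinv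
        (hfl e (hmem e List.mem_cons_self))
    rw [List.foldl_cons]
    have hstep : (match pvA_dfs mm fuel (res, memo).2 e with
        | some (v, memo') => (PySem.Dict.insert (res, memo).1 e v, memo')
        | none => (PySem.Dict.insert (res, memo).1 e 0, (res, memo).2)) =
        (PySem.Dict.insert res e (pvTc arr e), memo') := by
      simp only [heq]
    rw [hstep,
      ihl (List.Nodup.of_cons hnd) (fun x hx => hmem x (List.mem_cons_of_mem e hx)) _ memo' hinv'
        (by intro x hx
            rw [PySem.Dict.contains_insert]
            have hxe : x ≠ e := fun h => (List.nodup_cons.1 hnd).1 (h ▸ hx)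
            simp [hxe, hcon x (List.mem_cons_of_mem e hx)]),
      PySem.Dict.items_insert_of_not_contains res _ (hcon e List.mem_cons_self)]
    simp

theorem pv_getD_foldl_insert (l : List String) (f : String → Int) (d0 : PySem.Dict String Int)
    (x : String) :
    (l.foldl (fun d e => PySem.Dict.insert d e (f e)) d0).getD x 0 =
      if x ∈ l then f x else d0.getD x 0 := by
  induction l generalizing d0 with
  | nil => simp
  | cons a rest ihl =>
    rw [List.foldl_cons, ihl]
    by_cases hr : x ∈ rest
    · simp [hr]
    · rw [if_neg hr, PySem.Dict.getD_insert]
      by_cases ha : x = a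
      · simp [ha]
      · simp [ha, hr]

theorem pv_counts_ok (arr : List (List String)) (ch : PySem.Dict String (List String))
    (hch : ∀ m, PySem.Dict.getD ch m [] = pvKids arr m) :
    ∀ (k : Nat) (x : String), (pvB_counts ch (pvNodes arr) k).getD x 0 =
      if x ∈ pvNodes arr then pvCnt arr k x else 0 := by
  intro k
  induction k with
  | zero =>
    intro x
    rw [pvB_counts, pv_getD_foldl_insert]
    simp [pvCnt]
  | succ k ihk =>
    intro x
    rw [pvB_counts, pv_getD_foldl_insert (f := fun e =>
      (PySem.Dict.getD ch e []).foldl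
        (fun s c => s + (1 + PySem.Dict.getD (pvB_counts ch (pvNodes arr) k) c 0)) 0)]
    by_cases hx : x ∈ pvNodes arr
    · rw [if_pos hx, if_pos hx, hch x, pvCnt]
      apply PySem.List.foldl_congr_mem
      intro acc c hc
      rw [ihk c, if_pos (pv_kid_mem_nodes arr x c hc)]
    · simp [hx]
-- ===== VERDICT (by name: the statement is the Claim_ definition above) =====
theorem count_employees_under_manager_spec : Claim_equal_count_employees_under_manager := by
  intro arr hdom hpre
  unfold Spec_count_employees_under_manager
  by_cases harr : arr = []
  · subst harr; rfl
  · have hbuild := pv_build_kids arr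
    have hnodes := pv_build_nodes arr
    have hN : ∀ e ∈ pvNodes arr, pvH arr e ≤ (pvNodes arr).length + 1 := by
      intro e he; have := pvH_le arr e he; omega
    have hnd : (PySem.List.sorted (pvNodes arr) (fun x => x) false).Nodup :=
      ((PySem.List.sorted_perm (pvNodes arr) (fun x => x) false).symm).nodup (pv_nodes_nodup arr)
    have hmemn : ∀ e ∈ PySem.List.sorted (pvNodes arr) (fun x => x) false, e ∈ pvNodes arr := by
      intro e he; exact (PySem.List.mem_sorted _ _ _ _).1 he
    simp only [count_employees_under_manager, if_neg harr]
    rw [hnodes]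
    rw [pv_loop_ok arr hpre (pvA_build arr).1 hbuild ((pvNodes arr).length + 1) hN
      (PySem.List.sorted (pvNodes arr) (fun x => x) false) hnd hmemn
      PySem.Dict.empty PySem.Dict.empty
      (by intro k v hkv; rw [PySem.Dict.get?_empty] at hkv; cases hkv)
      (by intro e _; exact PySem.Dict.contains_empty e)]
    simp only [count_employees_under_manager_alt, pv_builds_eq arr, hnodes]
    rw [List.map_congr_left (l := PySem.List.sorted (pvNodes arr) (fun x => x) false)
      (f := fun e => (e, PySem.Dict.getD
        (pvB_counts (pvA_build arr).1 (pvNodes arr) (pvNodes arr).length) e 0))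
      (g := fun e => (e, pvTc arr e))
      (by intro e he
          have hen : e ∈ pvNodes arr := hmemn e he
          simp only []
          rw [pv_counts_ok arr (pvA_build arr).1 hbuild (pvNodes arr).length e, if_pos hen,
            pv_cnt_stable arr hpre e (pvNodes arr).length (pvH_le arr e hen)])]
    simp [PySem.Dict.empty]
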